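-- pv_equiv track=rewrite | github.com/sirmar/yatzy-monorepo | bot/src/app/sim/dice_keep.py | keep_two_pairs
-- ===== SOURCE A (Python) =====
-- from collections import Counter
--
-- def keep_n_of_face(dice: list[int], face: int, n: int) -> list[bool]:
--   keep_indices = set([i for i, d in enumerate(dice) if d == face][:n])
--   return [i in keep_indices for i in range(len(dice))]
--
-- def keep_pairs_from_faces(dice: list[int], faces: list[int]) -> list[bool]:
--   partials = [keep_n_of_face(dice, face, 2) for face in faces]
--   return [any(col) for col in zip(*partials)]
--
-- def keep_best_single(dice: list[int]) -> list[bool]: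
--   kept = [False] * len(dice)
--   kept[dice.index(max(dice))] = True
--   return kept
--
-- def keep_two_pairs(dice: list[int]) -> list[bool]:
--   counts = Counter(dice)
--   faces = sorted([face for face, count in counts.items() if count >= 2], reverse=True)[
--     :2
--   ]
--   if faces:
--     pairs_keep = keep_pairs_from_faces(dice, faces)
--     paired = set(faces)
--     min_pair = min(faces)
--     singles = [
--       face
--       for face in counts
--       if face not in paired and counts[face] == 1 and face > min_pair
--     ]
--     if singles:
--       single_keep = keep_n_of_face(dice, max(singles), 1)
--       return [a or b for a, b in zip(pairs_keep, single_keep)]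
--     return pairs_keep
--   return keep_best_single(dice)
-- ===== SOURCE B (Python) =====
-- from collections import Counter
--
-- def keep_two_pairs(dice: list[int]) -> list[bool]:
--   counts = Counter(dice)
--   pair_faces = sorted((f for f, c in counts.items() if c >= 2), reverse=True)[:2]
--   if pair_faces:
--     lo = min(pair_faces)
--     singles = [f for f, c in counts.items() if c == 1 and f > lo]
--     best = max(singles) if singles else None
--     pair_set = set(pair_faces)
--   else:
--     best = max(dice)
--     pair_set = set()
--   out = []
--   seen = {}
--   for d in dice:
--     k = seen.get(d, 0)
--     seen[d] = k + 1
--     out.append((d in pair_set and k < 2) or (best is not None and d == best and k == 0))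
--   return out
-- ===== Notes on version B (the rewrite author's own statement) =====
-- stated objective: alternative
-- what changed: B decides each position in one left-to-right streaming pass using a running per-face occurrence counter (keep a die iff it is a pair face seen fewer than 2 times so far, or the chosen kicker seen 0 times so far), instead of A's per-face boolean masks that are OR-combined columnwise via zip(*partials) plus extra dice.index/keep_n_of_face scans.
-- outside the precondition, e.g. on keep_two_pairs([]): A raises ValueError, B raises ValueError
import Mathlib
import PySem

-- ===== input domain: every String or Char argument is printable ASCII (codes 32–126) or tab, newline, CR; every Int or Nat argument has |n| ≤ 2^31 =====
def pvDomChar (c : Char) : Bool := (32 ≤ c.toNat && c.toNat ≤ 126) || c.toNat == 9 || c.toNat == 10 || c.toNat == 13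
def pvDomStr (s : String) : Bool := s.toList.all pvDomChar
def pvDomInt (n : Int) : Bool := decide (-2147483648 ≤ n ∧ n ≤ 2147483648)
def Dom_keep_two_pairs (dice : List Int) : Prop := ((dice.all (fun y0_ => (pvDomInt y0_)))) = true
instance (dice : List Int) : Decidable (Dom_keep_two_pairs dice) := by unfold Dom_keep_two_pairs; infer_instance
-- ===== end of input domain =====

-- B decides each position in one streaming pass with a running per-face occurrence counter,
-- instead of A's per-face boolean masks OR-combined columnwise via zip(*partials) (objective: alternative).


-- ===== PORT A =====
def keep_n_of_face (dice : List Int) (face : Int) (n : Nat) : List Bool :=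
  let keep_indices : PySem.Set Int :=
    PySem.Set.ofList ((((PySem.List.enumerate dice).filter (fun p => p.2 == face)).map (·.1)).take n)
  (PySem.List.pyRange 0 dice.length 1).map (fun i => keep_indices.contains i)

-- zip(*partials) then any per column; the call site passes equal-length rows (each of length len(dice)),
-- where column i is the entries at index i — exact there.
def keep_pairs_from_faces (dice : List Int) (faces : List Int) : List Bool :=
  let partials := faces.map (fun face => keep_n_of_face dice face 2)
  match partials with
  | [] => []
  | p :: ps => (List.range p.length).map (fun i => (p :: ps).any (fun l => l.getD i false))

def keep_best_single (dice : List Int) : List Bool :=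
  -- kept = [False]*len(dice); kept[dice.index(max(dice))] = True  (max/index raise on [], excluded by Pre_)
  match PySem.List.max? dice (fun x => x) with
  | none => []
  | some m =>
    match PySem.List.index? dice m with
    | none => []
    | some j => PySem.List.pySetD (List.replicate dice.length false) (j : Int) true

def keep_two_pairs (dice : List Int) : List Bool :=
  let counts := PySem.Dict.counter dice
  let faces := (PySem.List.sorted ((counts.items.filter (fun p => 2 ≤ p.2)).map (·.1)) (fun x => x) true).take 2
  if !faces.isEmpty then
    let pairs_keep := keep_pairs_from_faces dice faces
    let paired := PySem.Set.ofList faces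
    match PySem.List.min? faces (fun x => x) with
    | none => []  -- unreachable: faces ≠ [] here
    | some min_pair =>
      let singles := counts.keys.filter
        (fun face => !(paired.contains face) && counts.getD face 0 == 1 && min_pair < face)
      if !singles.isEmpty then
        match PySem.List.max? singles (fun x => x) with
        | none => []  -- unreachable: singles ≠ [] here
        | some s =>
          let single_keep := keep_n_of_face dice s 1
          (pairs_keep.zip single_keep).map (fun p => p.1 || p.2)
      else pairs_keep
  else keep_best_single dice

-- ===== PORT B =====
-- decision for one die d whose face has been seen k times so far
def altKeep (pair_set : PySem.Set Int) (best : Option Int) (d : Int) (k : Int) : Bool :=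
  (pair_set.contains d && decide (k < 2)) || (decide (best = some d) && (k == 0))

-- loop body: 'k = seen.get(d, 0); seen[d] = k + 1; out.append(...)'
def altStep (pair_set : PySem.Set Int) (best : Option Int)
    (st : PySem.Dict Int Int × List Bool) (d : Int) : PySem.Dict Int Int × List Bool :=
  let k := st.1.getD d 0
  (st.1.insert d (k + 1), st.2 ++ [altKeep pair_set best d k])

def keep_two_pairs_alt (dice : List Int) : List Bool :=
  let counts := PySem.Dict.counter dice
  let pair_faces := (PySem.List.sorted ((counts.items.filter (fun p => 2 ≤ p.2)).map (·.1)) (fun x => x) true).take 2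
  let bp : Option Int × PySem.Set Int :=
    if !pair_faces.isEmpty then
      match PySem.List.min? pair_faces (fun x => x) with
      | none => (none, PySem.Set.ofList pair_faces)  -- unreachable: pair_faces ≠ []
      | some lo =>
        let singles := (counts.items.filter (fun p => p.2 == 1 && decide (lo < p.1))).map (·.1)
        ((if !singles.isEmpty then PySem.List.max? singles (fun x => x) else none),
         PySem.Set.ofList pair_faces)
    else
      (PySem.List.max? dice (fun x => x), PySem.Set.empty)
  (dice.foldl (altStep bp.2 bp.1) (PySem.Dict.empty, [])).2

-- ===== PRECONDITION & SPEC =====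
-- A raises ValueError (max() of an empty sequence) on dice = []; excluded.
def Pre_keep_two_pairs (dice : List Int) : Prop := dice ≠ []
instance (dice : List Int) : Decidable (Pre_keep_two_pairs dice) := by unfold Pre_keep_two_pairs; infer_instance
def pvWitness_keep_two_pairs : List Int := ([2, 2, 3, 3, 5])

def Spec_keep_two_pairs (dice : List Int) (out : List Bool) : Prop := out = keep_two_pairs_alt dice
instance (dice : List Int) (out : List Bool) : Decidable (Spec_keep_two_pairs dice out) := by unfold Spec_keep_two_pairs; infer_instance

-- ===== CLAIM (what is proved, stated in full; the proofs are below) =====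
def Claim_equal_keep_two_pairs : Prop := ∀ (dice : List Int), Dom_keep_two_pairs dice → Pre_keep_two_pairs dice → Spec_keep_two_pairs dice (keep_two_pairs dice)

-- ===== LEMMAS AND PROOFS =====

-- the list of indices keep_n_of_face keeps: first n positions of `face` in `dice`
def pvIdxs (dice : List Int) (f : Int) (n : Nat) : List Int :=
  (((PySem.List.enumerate dice).filter (fun p => p.2 == f)).map (·.1)).take n

theorem pv_kno (dice : List Int) (f : Int) (n : Nat) :
    keep_n_of_face dice f n =
      (List.range dice.length).map (fun i : Nat => decide (((i : Int)) ∈ pvIdxs dice f n)) := by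
  unfold keep_n_of_face pvIdxs
  rw [PySem.List.pyRange_zero_natCast, List.map_map]
  apply List.map_congr_left
  intro k _
  simp [PySem.Set.mem_ofList]

-- members of the filtered enumeration have index ≥ start
theorem pv_enum_lb (P : Int × Int → Bool) (l : List Int) (s x : Int)
    (hx : x ∈ ((PySem.List.enumerate l s).filter P).map (·.1)) : s ≤ x := by
  obtain ⟨p, hp, rfl⟩ := List.mem_map.mp hx
  have hp2 := List.mem_of_mem_filter hp
  obtain ⟨k, hk, rfl⟩ := (PySem.List.mem_enumerate_iff _ _ _).mp hp2
  simp

-- membership in the first-n-occurrences index list ↔ prefix-count characterization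
theorem pv_mem_take (g : Int) : ∀ (l : List Int) (s : Int) (n k : Nat) (hk : k < l.length),
    ((s + (k : Int)) ∈ (((PySem.List.enumerate l s).filter (fun p => p.2 == g)).map (·.1)).take n)
      ↔ (l[k] = g ∧ (l.take k).count g < n) := by
  intro l
  induction l with
  | nil => intro s n k hk; simp at hk
  | cons d t ih =>
    intro s n k hk
    rw [PySem.List.enumerate_cons, List.filter_cons]
    by_cases hd : (d == g) = true
    · rw [if_pos (by simpa using hd)]
      have hdg : d = g := by simpa using hd
      subst hdg
      cases n with
      | zero => simp
      | succ m =>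
        rw [List.map_cons, List.take_succ_cons]
        cases k with
        | zero => simp
        | succ j =>
          have hj : j < t.length := by simpa using hk
          have harith : s + ((j + 1 : Nat) : Int) = (s + 1) + (j : Int) := by push_cast; ring
          rw [harith, List.mem_cons]
          have h2 : ((s + 1) + (j : Int)) ≠ s := by omega
          simp only [h2, false_or]
          rw [ih (s + 1) m j hj]
          have hcc : ((d :: t).take (j + 1)).count d = (t.take j).count d + 1 := by
            simp
          simp only [List.getElem_cons_succ, hcc]
          constructor
          · rintro ⟨x1, x2⟩; exact ⟨x1, by omega⟩
          · rintro ⟨x1, x2⟩; exact ⟨x1, by omega⟩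
    · rw [if_neg hd]
      have hdg : d ≠ g := by simpa using hd
      cases k with
      | zero =>
        have hno : s ∉
            ((((PySem.List.enumerate t (s + 1)).filter (fun p => p.2 == g)).map (·.1)).take n) := by
          intro hmem
          have := pv_enum_lb _ t (s + 1) _ (List.mem_of_mem_take hmem)
          omega
        simp [hno, hdg]
      | succ j =>
        have hj : j < t.length := by simpa using hk
        have harith : s + ((j + 1 : Nat) : Int) = (s + 1) + (j : Int) := by push_cast; ring
        rw [harith, ih (s + 1) n j hj]
        simp [hdg]

theorem pv_mem (dice : List Int) (g : Int) (n k : Nat) (hk : k < dice.length) :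
    ((k : Int) ∈ pvIdxs dice g n) ↔ (dice[k] = g ∧ (dice.take k).count g < n) := by
  have := pv_mem_take g dice 0 n k hk
  simpa using this

theorem pv_first (v : Int) (l : List Int) : ∀ (s : Int),
    (((PySem.List.enumerate l s).filter (fun p => p.2 == v)).map (·.1)).take 1 =
      (PySem.List.index? l v).elim [] (fun j => [s + (j : Int)]) := by
  induction l with
  | nil => intro s; simp [PySem.List.enumerate, PySem.List.index?_eq_idxOf?]
  | cons d l ih =>
    intro s
    rw [PySem.List.enumerate_cons, List.filter_cons]
    by_cases hd : d = v
    · subst hd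
      rw [PySem.List.index?_cons_self, if_pos (by simp)]
      simp
    · rw [if_neg (by simp [hd]), PySem.List.index?_cons_of_ne l hd, ih (s + 1)]
      cases PySem.List.index? l v with
      | none => simp
      | some j => simp; ring

theorem pv_pairs (dice : List Int) (F : List Int) (hF : F ≠ []) :
    keep_pairs_from_faces dice F =
      (List.range dice.length).map (fun i : Nat => decide (∃ g ∈ F, (i : Int) ∈ pvIdxs dice g 2)) := by
  unfold keep_pairs_from_faces
  cases F with
  | nil => exact absurd rfl hF
  | cons a rest =>
    simp only [List.map_cons]
    have hlen : (keep_n_of_face dice a 2).length = dice.length := by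
      rw [pv_kno]; simp
    rw [hlen]
    apply List.map_congr_left
    intro i hi
    have hi' : i < dice.length := List.mem_range.mp hi
    have hg : ∀ g, (keep_n_of_face dice g 2).getD i false = decide ((i : Int) ∈ pvIdxs dice g 2) := by
      intro g; rw [pv_kno]; exact PySem.List.getD_map_range _ _ _ _ hi'
    apply Bool.eq_iff_iff.mpr
    simp only [List.any_cons, List.any_map, Function.comp, hg, Bool.or_eq_true,
      List.any_eq_true, decide_eq_true_eq, List.mem_cons]
    constructor
    · rintro (h | ⟨g, hg1, hg2⟩)
      · exact ⟨a, Or.inl rfl, h⟩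
      · exact ⟨g, Or.inr hg1, hg2⟩
    · rintro ⟨g, (rfl | hg1), h⟩
      · exact Or.inl h
      · exact Or.inr ⟨g, hg1, h⟩

-- B's loop: the produced mask, with the running dict generalized to the counter of the consumed prefix
theorem pv_fold (ps : PySem.Set Int) (best : Option Int) :
    ∀ (l pre : List Int) (D : PySem.Dict Int Int) (acc : List Bool),
    (∀ x, D.getD x 0 = ((pre.count x : Nat) : Int)) →
    (l.foldl (altStep ps best) (D, acc)).2 =
      acc ++ (List.range l.length).map
        (fun j => altKeep ps best (l.getD j 0) (((pre ++ l.take j).count (l.getD j 0) : Nat) : Int)) := by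
  intro l
  induction l with
  | nil => intro pre D acc h; simp
  | cons d t ih =>
    intro pre D acc h
    rw [List.foldl_cons]
    show (t.foldl (altStep ps best) (D.insert d (D.getD d 0 + 1), acc ++ [altKeep ps best d (D.getD d 0)])).2 = _
    rw [ih (pre ++ [d]) (D.insert d (D.getD d 0 + 1)) _ ?_]
    · rw [List.append_assoc]
      congr 1
      rw [List.length_cons, List.range_succ_eq_map, List.map_cons, List.map_map,
        List.singleton_append, List.cons_eq_cons]
      constructor
      · simp [h d]
      · apply List.map_congr_left
        intro j _
        simp only [Function.comp]
        have h1 : (d :: t).getD (j + 1) 0 = t.getD j 0 := rfl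
        have h2 : (d :: t).take (j + 1) = d :: t.take j := rfl
        rw [h1, h2, List.append_assoc]
        rfl
    · intro x
      rw [PySem.Dict.getD_insert]
      by_cases hx : x = d
      · subst hx
        rw [if_pos rfl, h x, List.count_append]
        simp
      · rw [if_neg hx, h x, List.count_append]
        have : [d].count x = 0 := by simp [List.count_singleton]; exact fun hdx => hx hdx.symm
        omega

theorem pv_alt_run (ps : PySem.Set Int) (best : Option Int) (dice : List Int) :
    (dice.foldl (altStep ps best) (PySem.Dict.empty, [])).2 =
      (List.range dice.length).map
        (fun j => altKeep ps best (dice.getD j 0) (((dice.take j).count (dice.getD j 0) : Nat) : Int)) := by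
  have := pv_fold ps best dice [] PySem.Dict.empty [] (by intro x; rfl)
  simpa using this

-- pointwise value of B's mask at a valid index
theorem pv_alt_at (ps : PySem.Set Int) (best : Option Int) (dice : List Int) (k : Nat)
    (hk : k < dice.length) :
    altKeep ps best (dice.getD k 0) (((dice.take k).count (dice.getD k 0) : Nat) : Int) =
      altKeep ps best dice[k] (((dice.take k).count dice[k] : Nat) : Int) := by
  rw [List.getD_eq_getElem dice 0 hk]

-- ===== MAIN =====
theorem pv_main (dice : List Int) (hpre : dice ≠ []) :
    keep_two_pairs dice = keep_two_pairs_alt dice := by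
  simp only [keep_two_pairs, keep_two_pairs_alt]
  set F := (PySem.List.sorted
      (((PySem.Dict.counter dice).items.filter (fun p => 2 ≤ p.2)).map (·.1))
      (fun x => x) true).take 2 with hF
  have hFcnt : ∀ g ∈ F, 2 ≤ (dice.count g : Int) := by
    intro g hg
    have h1 : g ∈ ((PySem.Dict.counter dice).items.filter (fun p => 2 ≤ p.2)).map (·.1) :=
      (PySem.List.mem_sorted _ _ _ _).mp (List.mem_of_mem_take hg)
    obtain ⟨p, hp, rfl⟩ := List.mem_map.mp h1
    have h2 := List.of_mem_filter hp
    have hpi := List.mem_of_mem_filter hp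
    rw [PySem.Dict.items_counter] at hpi
    obtain ⟨k, _, rfl⟩ := List.mem_map.mp hpi
    simpa using h2
  cases hFc : F with
  | nil =>
    -- no pair faces: first-max index on both sides
    simp only [List.isEmpty_nil, Bool.not_true, Bool.false_eq_true, if_false]
    obtain ⟨m, hm⟩ : ∃ m, PySem.List.max? dice (fun x => x) = some m := by
      cases h : PySem.List.max? dice (fun x => x) with
      | none => exact absurd ((PySem.List.max?_eq_none_iff _ _).mp h) hpre
      | some m => exact ⟨m, rfl⟩
    obtain ⟨j, hj⟩ : ∃ j, PySem.List.index? dice m = some j := by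
      cases h : PySem.List.index? dice m with
      | none =>
        have := (PySem.List.index?_isSome_iff dice m).mpr (PySem.List.max?_mem hm)
        rw [h] at this; simp at this
      | some j => exact ⟨j, rfl⟩
    obtain ⟨hjlt, -, -⟩ := PySem.List.getElem_of_index?_eq_some hj
    unfold keep_best_single
    simp only [hm, hj, pv_alt_run]
    have hIdx1 : pvIdxs dice m 1 = [(j : Int)] := by
      unfold pvIdxs
      have h := pv_first m dice 0
      rw [hj] at h
      simpa using h
    rw [PySem.List.pySetD_natCast]
    apply List.ext_getElem
    · simp
    · intro i h1 h2
      have hi : i < dice.length := by simpa using h1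
      simp only [List.getElem_set, List.getElem_replicate, List.getElem_map, List.getElem_range]
      rw [pv_alt_at PySem.Set.empty (some m) dice i hi]
      unfold altKeep
      have hmem := pv_mem dice m 1 i hi
      rw [hIdx1] at hmem
      simp only [List.mem_singleton, Int.natCast_inj] at hmem
      have hemp : PySem.Set.contains PySem.Set.empty dice[i] = false := rfl
      rw [hemp]
      simp only [Bool.false_and, Bool.false_or]
      by_cases hij : j = i
      · subst hij
        obtain ⟨hd, hc⟩ := hmem.mp rfl
        simp [hd, Nat.lt_one_iff.mp hc]
      · rw [if_neg hij]
        by_cases hdm : dice[i] = m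
        · rw [hdm]
          have hcount : (dice.take i).count m ≠ 0 := by
            intro h0
            exact hij (hmem.mpr ⟨hdm, by omega⟩).symm
          simp [hcount]
        · simp [Ne.symm hdm]
  | cons a rest =>
    simp only [List.isEmpty_cons, Bool.not_false, if_true]
    obtain ⟨mp, hmp⟩ : ∃ mp, PySem.List.min? (a :: rest) (fun x => x) = some mp := by
      cases h : PySem.List.min? (a :: rest) (fun x => x) with
      | none => simp [PySem.List.min?_eq_none_iff] at h
      | some mp => exact ⟨mp, rfl⟩
    simp only [hmp]
    -- the two `singles` lists are the same list
    have hsing :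
        (PySem.Dict.counter dice).keys.filter
          (fun face => !((PySem.Set.ofList (a :: rest)).contains face) &&
            (PySem.Dict.counter dice).getD face 0 == 1 && decide (mp < face)) =
        (((PySem.Dict.counter dice).items.filter (fun p => p.2 == 1 && decide (mp < p.1))).map (·.1)) := by
      rw [PySem.Dict.keys_counter, PySem.Dict.items_counter, List.filter_map, List.map_map]
      have hcmp : ((·.1) ∘ fun k : Int => (k, (dice.count k : Int))) = id := rfl
      rw [hcmp, List.map_id]
      apply List.filter_congr
      intro k _
      simp only [Function.comp, PySem.Dict.getD_counter]
      by_cases h1 : dice.count k = 1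
      · have hnotF : k ∉ (a :: rest) := by
          intro hk
          have := hFcnt k (hFc ▸ hk)
          omega
        simp [PySem.Set.mem_ofList, hnotF, h1]
      · have hb : ((dice.count k : Int) == 1) = false := by
          simp only [beq_eq_false_iff_ne, ne_eq]
          omega
        simp [hb]
    rw [hsing]
    -- first disjunct of altKeep ↔ A's pair mask, pointwise
    have hpairmem : ∀ (k : Nat) (hk : k < dice.length),
        ((∃ g ∈ (a :: rest), (k : Int) ∈ pvIdxs dice g 2) ↔
          (dice[k] ∈ (a :: rest) ∧ (dice.take k).count dice[k] < 2)) := by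
      intro k hk
      constructor
      · rintro ⟨g, hg1, hg2⟩
        obtain ⟨hdk, hcnt⟩ := (pv_mem dice g 2 k hk).mp hg2
        exact ⟨hdk ▸ hg1, hdk ▸ hcnt⟩
      · rintro ⟨h1, h2⟩
        exact ⟨dice[k], h1, (pv_mem dice dice[k] 2 k hk).mpr ⟨rfl, h2⟩⟩
    cases hse : (((PySem.Dict.counter dice).items.filter (fun p => p.2 == 1 && decide (mp < p.1))).map (·.1)).isEmpty with
    | true =>
      simp only [Bool.not_true, Bool.false_eq_true, if_false]
      rw [pv_pairs dice (a :: rest) (by simp), pv_alt_run]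
      apply List.map_congr_left
      intro k hk
      have hk' : k < dice.length := List.mem_range.mp hk
      rw [pv_alt_at _ _ _ _ hk']
      unfold altKeep
      apply Bool.eq_iff_iff.mpr
      simp only [decide_eq_true_eq, Bool.or_eq_true, Bool.and_eq_true,
        PySem.Set.contains_eq_decide, PySem.Set.mem_ofList]
      rw [hpairmem k hk']
      have hnone : (none : Option Int) ≠ some dice[k] := by simp
      constructor
      · rintro ⟨h1, h2⟩
        exact Or.inl ⟨h1, by omega⟩
      · rintro (⟨h1, h2⟩ | ⟨h1, -⟩)
        · exact ⟨h1, by omega⟩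
        · exact absurd h1 hnone
    | false =>
      simp only [Bool.not_false, if_true]
      obtain ⟨s0, hs0⟩ : ∃ s0, PySem.List.max?
          (((PySem.Dict.counter dice).items.filter (fun p => p.2 == 1 && decide (mp < p.1))).map (·.1))
          (fun x => x) = some s0 := by
        cases h : PySem.List.max?
            (((PySem.Dict.counter dice).items.filter (fun p => p.2 == 1 && decide (mp < p.1))).map (·.1))
            (fun x => x) with
        | none =>
          rw [PySem.List.max?_eq_none_iff] at h
          rw [h] at hse; simp at hse
        | some s0 => exact ⟨s0, rfl⟩
      simp only [hs0]
      rw [pv_pairs dice (a :: rest) (by simp), pv_kno, List.zip_map', List.map_map, pv_alt_run]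
      apply List.map_congr_left
      intro k hk
      have hk' : k < dice.length := List.mem_range.mp hk
      rw [pv_alt_at _ _ _ _ hk']
      unfold altKeep
      apply Bool.eq_iff_iff.mpr
      simp only [Function.comp, Bool.or_eq_true, decide_eq_true_eq, Bool.and_eq_true,
        PySem.Set.contains_eq_decide, PySem.Set.mem_ofList]
      rw [hpairmem k hk', pv_mem dice s0 1 k hk']
      constructor
      · rintro (⟨h1, h2⟩ | ⟨h1, h2⟩)
        · exact Or.inl ⟨h1, by omega⟩
        · refine Or.inr ⟨by rw [h1], ?_⟩
          have hz : (dice.take k).count dice[k] = 0 := by rw [h1]; omega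
          simp [hz]
      · rintro (⟨h1, h2⟩ | ⟨h1, h2⟩)
        · exact Or.inl ⟨h1, by omega⟩
        · have hds : dice[k] = s0 := by
            injection h1 with h; exact h.symm
          have h2' : (dice.take k).count dice[k] = 0 := by
            have := (beq_iff_eq).mp h2
            omega
          exact Or.inr ⟨hds, by rw [← hds]; omega⟩

-- ===== VERDICT (by name: the statement is the Claim_ definition above) =====
theorem keep_two_pairs_spec : Claim_equal_keep_two_pairs := by
  intro dice _ hpre
  exact pv_main dice hpre
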